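-- pv_equiv track=rewrite | github.com/yagoliz/aoc2025 | src/aoc/day1/solution.py | part_2
-- ===== SOURCE A (Python) =====
-- def part_2(content: str):
--
--     password = 0
--     dial = 50
--     for line in content.splitlines():
--         rotation = line[0]
--         number = int(line[1:])
--
--         password += number // 100
--
--         number %= 100
--
--         if rotation == 'L':
--             number *= -1
--
--         old_dial = dial
--         dial += number
--         if dial == 0:
--             if old_dial != 0:
--                 password += 1
--         elif dial < 0:
--             if old_dial != 0:
--                 password += 1
--             dial += 100
--         elif dial > 99:
--             password += 1
--             dial -= 100
--
--     return password
-- ===== SOURCE B (Python) =====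
-- def part_2(content: str):
--     # Unwrapped cumulative position instead of a wrapped dial with branch cascades.
--     password = 0
--     pos = 50
--     for line in content.splitlines():
--         rotation = line[0]
--         number = int(line[1:])
--         if rotation == 'L':
--             new = pos - number
--             password += (pos - 1) // 100 - (new - 1) // 100
--         else:
--             new = pos + number
--             password += new // 100 - pos // 100
--         pos = new
--     return password
-- ===== Notes on version B (the rewrite author's own statement) =====
-- stated objective: simpler
-- what changed: B drops the wrapped 0..99 dial and its four-way wrap/branch cascade, keeping an unwrapped cumulative position and counting crossings of multiples of 100 with two floor-division differences (half-open interval, direction-dependent).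
import Mathlib
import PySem

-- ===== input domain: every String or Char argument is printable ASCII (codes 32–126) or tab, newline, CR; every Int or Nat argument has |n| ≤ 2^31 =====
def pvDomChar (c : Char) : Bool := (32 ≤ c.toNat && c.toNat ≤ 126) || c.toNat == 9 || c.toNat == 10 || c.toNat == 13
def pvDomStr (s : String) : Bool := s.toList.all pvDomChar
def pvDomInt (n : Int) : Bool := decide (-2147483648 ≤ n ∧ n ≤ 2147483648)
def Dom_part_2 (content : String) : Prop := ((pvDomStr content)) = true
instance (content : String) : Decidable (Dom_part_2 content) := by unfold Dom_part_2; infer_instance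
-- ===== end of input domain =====

-- B replaces A's wrapped dial (0..99 with a branch cascade on wrap) by an unwrapped
-- cumulative position, counting the multiples of 100 crossed via floor-division differences.

-- ===== PORT A =====
def part_2_step (st : Option (Int × Int)) (line : String) : Option (Int × Int) :=
  match st with
  | none => none
  | some (password, dial) =>
    match PySem.Str.pyGet? line 0, PySem.Int.ofStr? (PySem.Str.slice line (some 1) none) with
    | some rotation, some n =>
      let password := password + PySem.Int.floordiv n 100
      let number := PySem.Int.mod n 100
      let number := if rotation == 'L' then number * (-1) else number
      let old_dial := dial
      let dial := dial + number
      if dial = 0 then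
        some (if old_dial ≠ 0 then password + 1 else password, dial)
      else if dial < 0 then
        some ((if old_dial ≠ 0 then password + 1 else password), dial + 100)
      else if dial > 99 then
        some (password + 1, dial - 100)
      else
        some (password, dial)
    | _, _ => none

def part_2 (content : String) : Int :=
  ((((PySem.Str.splitlines content).foldl part_2_step (some (0, 50))).map Prod.fst).getD 0)

-- ===== PORT B =====
def part_2_alt_step (st : Option (Int × Int)) (line : String) : Option (Int × Int) :=
  match st with
  | none => none
  | some (password, pos) =>
    match PySem.Str.pyGet? line 0, PySem.Int.ofStr? (PySem.Str.slice line (some 1) none) with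
    | some rotation, some n =>
      if rotation == 'L' then
        let new := pos - n
        some (password + (PySem.Int.floordiv (pos - 1) 100 - PySem.Int.floordiv (new - 1) 100), new)
      else
        let new := pos + n
        some (password + (PySem.Int.floordiv new 100 - PySem.Int.floordiv pos 100), new)
    | _, _ => none

def part_2_alt (content : String) : Int :=
  ((((PySem.Str.splitlines content).foldl part_2_alt_step (some (0, 50))).map Prod.fst).getD 0)

-- ===== PRECONDITION & SPEC =====
-- Pre_ excludes exactly the inputs on which the Python A raises: a line that is empty
-- (IndexError on line[0]) or whose tail is not a valid int literal (ValueError on int(line[1:])).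
def Pre_part_2 (content : String) : Prop :=
  ∀ line ∈ PySem.Str.splitlines content,
    (PySem.Str.pyGet? line 0).isSome ∧
    (PySem.Int.ofStr? (PySem.Str.slice line (some 1) none)).isSome
instance (content : String) : Decidable (Pre_part_2 content) := by unfold Pre_part_2; infer_instance

def pvWitness_part_2 : String := "R150\nL60\nL7"

def Spec_part_2 (content : String) (out : Int) : Prop := out = part_2_alt content
instance (content : String) (out : Int) : Decidable (Spec_part_2 content out) := by unfold Spec_part_2; infer_instance

-- ===== CLAIM (what is proved, stated in full; the proofs are below) =====
def Claim_equal_part_2 : Prop := ∀ (content : String), Dom_part_2 content → Pre_part_2 content → Spec_part_2 content (part_2 content)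

-- ===== LEMMAS AND PROOFS =====

theorem step_rel (pw p : Int) (line : String) :
    part_2_step (some (pw, PySem.Int.mod p 100)) line =
      (part_2_alt_step (some (pw, p)) line).map (fun s => (s.1, PySem.Int.mod s.2 100)) := by
  unfold part_2_step part_2_alt_step
  cases h1 : PySem.Str.pyGet? line 0 with
  | none => simp
  | some rotation =>
    cases h2 : PySem.Int.ofStr? (PySem.Str.slice line (some 1) none) with
    | none => simp
    | some n =>
      simp only [PySem.Int.floordiv_eq_ediv_of_pos (a := n) (by norm_num : (0:Int) < 100),
        PySem.Int.mod_eq_emod_of_pos (a := n) (by norm_num : (0:Int) < 100),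
        PySem.Int.mod_eq_emod_of_pos (a := p) (by norm_num : (0:Int) < 100)]
      by_cases hL : rotation == 'L' <;>
        simp only [hL, if_true, if_false, Bool.false_eq_true,
          PySem.Int.floordiv_eq_ediv_of_pos (by norm_num : (0:Int) < 100),
          PySem.Int.mod_eq_emod_of_pos (by norm_num : (0:Int) < 100)] <;>
        split_ifs <;> simp_all <;> omega

theorem fold_none (lines : List String) :
    lines.foldl part_2_step none = none := by
  induction lines with
  | nil => rfl
  | cons l ls ih => simpa [part_2_step] using ih

theorem fold_none_alt (lines : List String) :
    lines.foldl part_2_alt_step none = none := by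
  induction lines with
  | nil => rfl
  | cons l ls ih => simpa [part_2_alt_step] using ih

theorem fold_rel (lines : List String) (pw p : Int) :
    lines.foldl part_2_step (some (pw, PySem.Int.mod p 100)) =
      (lines.foldl part_2_alt_step (some (pw, p))).map (fun s => (s.1, PySem.Int.mod s.2 100)) := by
  induction lines generalizing pw p with
  | nil => rfl
  | cons l ls ih =>
    simp only [List.foldl_cons, step_rel]
    cases h : part_2_alt_step (some (pw, p)) l with
    | none => simp [fold_none ls, fold_none_alt ls]
    | some s => simpa using ih s.1 s.2

-- ===== VERDICT (by name: the statement is the Claim_ definition above) =====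
theorem part_2_spec : Claim_equal_part_2 := by
  intro content _ _
  unfold Spec_part_2 part_2 part_2_alt
  have h := fold_rel (PySem.Str.splitlines content) 0 50
  have h50 : PySem.Int.mod 50 100 = 50 := by decide
  rw [h50] at h
  rw [h]
  cases hx : (PySem.Str.splitlines content).foldl part_2_alt_step (some (0, 50)) <;> simp [hx]
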